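-- pv_equiv track=rewrite | github.com/nvamsi2015/elementary-DS | BS/all.py | upgrade_possible
-- ===== SOURCE A (Python) =====
-- def upgrade_possible(cooldown, mid, n, m, k):
--     upgrades = 0
--     antique = 0
--     flag = 0
--     for i in range(n):
--         if cooldown[i] <= mid:
--             antique += 1
--         else:
--             antique = 0
--         if antique == k:
--             upgrades += 1
--             antique = 0
--
--     if upgrades >= m:
--         flag = 1
--     return flag
-- ===== SOURCE B (Python) =====
-- def upgrade_possible(cooldown, mid, n, m, k):
--     # Staged decomposition: first collect the positions of the "blockers"
--     # (elements > mid) among the scanned indices, then count the k-blocks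
--     # inside each gap between consecutive blockers purely by index
--     # arithmetic -- no per-element counter.
--     idxs = range(n)
--     blockers = [i for i in idxs if cooldown[i] > mid]
--     total = 0
--     prev = -1
--     for b in blockers:
--         total += (b - prev - 1) // k
--         prev = b
--     total += (len(idxs) - prev - 1) // k
--     return 1 if total >= m else 0
-- ===== Notes on version B (the rewrite author's own statement) =====
-- stated objective: alternative
-- what changed: B replaces A's single-pass count-to-k-and-reset counter with a staged decomposition: it first materialises the list of blocker positions (elements > mid) with a comprehension, then derives the upgrade count by index arithmetic (gap // k) over consecutive blocker positions, with no per-element run counter.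
-- outside the precondition, e.g. on upgrade_possible([3], 5, 1, 1, 0): A returns 0, B raises ZeroDivisionError; on upgrade_possible([3, 3], 5, 2, 0, -1): A returns 1, B returns 0
import Mathlib
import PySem

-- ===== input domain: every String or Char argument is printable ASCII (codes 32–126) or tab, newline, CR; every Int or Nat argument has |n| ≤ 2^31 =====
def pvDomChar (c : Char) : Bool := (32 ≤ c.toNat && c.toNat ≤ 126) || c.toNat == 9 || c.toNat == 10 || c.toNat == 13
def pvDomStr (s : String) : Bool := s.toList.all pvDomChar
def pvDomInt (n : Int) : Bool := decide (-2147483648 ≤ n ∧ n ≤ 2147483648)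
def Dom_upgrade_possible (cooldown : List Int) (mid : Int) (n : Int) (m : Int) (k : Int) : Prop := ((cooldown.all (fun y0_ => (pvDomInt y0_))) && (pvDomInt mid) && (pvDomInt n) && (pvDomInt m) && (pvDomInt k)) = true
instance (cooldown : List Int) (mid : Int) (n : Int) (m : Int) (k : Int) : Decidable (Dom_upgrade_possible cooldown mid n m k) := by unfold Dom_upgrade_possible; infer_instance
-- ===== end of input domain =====

-- B replaces A's per-element count-to-k-and-reset counter by a staged decomposition:
-- collect blocker positions first, then count k-blocks per gap by index arithmetic
-- (objective: alternative decomposition, same O(n) cost).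

-- ===== PORT A =====
-- loop body of A: 'if cooldown[i] <= mid: antique += 1 else: antique = 0; if antique == k: upgrades += 1; antique = 0'
-- cooldown[i] is ported as pyGetD; the IndexError inputs (n > len(cooldown)) are excluded by Pre_.
def pvStepA (cooldown : List Int) (mid k : Int) (s : Int × Int) (i : Int) : Int × Int :=
  let antique : Int := if PySem.List.pyGetD cooldown i 0 ≤ mid then s.2 + 1 else 0
  if antique = k then (s.1 + 1, 0) else (s.1, antique)

def upgrade_possible (cooldown : List Int) (mid : Int) (n : Int) (m : Int) (k : Int) : Int :=
  let st := (PySem.List.pyRange 0 n 1).foldl (pvStepA cooldown mid k) ((0 : Int), (0 : Int))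
  if st.1 ≥ m then 1 else 0

-- ===== PORT B =====
-- loop body of B's second stage: 'total += (b - prev - 1) // k; prev = b'
def pvFlushB (k : Int) (s : Int × Int) (b : Int) : Int × Int :=
  (s.1 + PySem.Int.floordiv (b - s.2 - 1) k, b)

def upgrade_possible_alt (cooldown : List Int) (mid : Int) (n : Int) (m : Int) (k : Int) : Int :=
  let idxs := PySem.List.pyRange 0 n 1
  let blockers := idxs.filter (fun i => decide (mid < PySem.List.pyGetD cooldown i 0))
  let st := blockers.foldl (pvFlushB k) ((0 : Int), (-1 : Int))
  if st.1 + PySem.Int.floordiv ((idxs.length : Int) - st.2 - 1) k ≥ m then 1 else 0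

-- ===== PRECONDITION & SPEC =====
-- Pre_ excludes (a) n > len(cooldown), where A raises IndexError, and (b) k ≤ 0, where
-- 'a run of k consecutive elements' is meaningless: B's gap division raises
-- ZeroDivisionError at k = 0 and floors negative quotients at k < 0, while A's counter
-- behaviour there (counting elements > mid at k = 0, never matching at k < 0) is accidental.
def Pre_upgrade_possible (cooldown : List Int) (mid : Int) (n : Int) (m : Int) (k : Int) : Prop :=
  (n ≤ (cooldown.length : Int) ∨ n < 0) ∧ 1 ≤ k
instance (cooldown : List Int) (mid : Int) (n : Int) (m : Int) (k : Int) : Decidable (Pre_upgrade_possible cooldown mid n m k) := by unfold Pre_upgrade_possible; infer_instance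

def pvWitness_upgrade_possible : List Int × Int × Int × Int × Int := ([2, 3, 9, 1, 1], 3, 5, 1, 2)

def Spec_upgrade_possible (cooldown : List Int) (mid : Int) (n : Int) (m : Int) (k : Int) (out : Int) : Prop := out = upgrade_possible_alt cooldown mid n m k
instance (cooldown : List Int) (mid : Int) (n : Int) (m : Int) (k : Int) (out : Int) : Decidable (Spec_upgrade_possible cooldown mid n m k out) := by unfold Spec_upgrade_possible; infer_instance

-- ===== CLAIM (what is proved, stated in full; the proofs are below) =====
def Claim_equal_upgrade_possible : Prop := ∀ (cooldown : List Int) (mid : Int) (n : Int) (m : Int) (k : Int), Dom_upgrade_possible cooldown mid n m k → Pre_upgrade_possible cooldown mid n m k → Spec_upgrade_possible cooldown mid n m k (upgrade_possible cooldown mid n m k)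

-- ===== LEMMAS AND PROOFS =====

-- proof-only intermediate: a run-length accumulator fold, the bridge between A and B.
def pvStepRun (cooldown : List Int) (mid k : Int) (s : Int × Int) (i : Int) : Int × Int :=
  if PySem.List.pyGetD cooldown i 0 ≤ mid then (s.1, s.2 + 1)
  else (s.1 + PySem.Int.floordiv s.2 k, 0)

-- arithmetic: for 0 < k, 0 ≤ r, incrementing r rolls the (quotient, remainder) pair.
lemma pv_div_succ_roll (k r : Int) (hk : 1 ≤ k) (hr : 0 ≤ r) (h : r % k + 1 = k) :
    (r + 1) / k = r / k + 1 ∧ (r + 1) % k = 0 := by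
  have hd := Int.mul_ediv_add_emod r k
  have hk0 : k ≠ 0 := by omega
  have : r + 1 = k * (r / k + 1) := by ring_nf; omega
  constructor
  · rw [this, Int.mul_ediv_cancel_left _ hk0]
  · rw [this]; exact Int.mul_emod_right _ _

lemma pv_div_succ_keep (k r : Int) (hk : 1 ≤ k) (hr : 0 ≤ r) (h : r % k + 1 ≠ k) :
    (r + 1) / k = r / k ∧ (r + 1) % k = r % k + 1 := by
  have hd := Int.mul_ediv_add_emod r k
  have hlt : r % k < k := Int.emod_lt_of_pos r (by omega)
  have hge : 0 ≤ r % k := Int.emod_nonneg r (by omega)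
  have huniq := Int.ediv_emod_unique (a := r + 1) (b := k) (r := r % k + 1) (q := r / k)
    (by omega : 0 < k)
  exact huniq.mpr ⟨by omega, by omega, by omega⟩

-- invariant I: A's state is (total + run/k, run % k) when the run fold's state is (total, run).
lemma pv_inv (cooldown : List Int) (mid k : Int) (hk : 1 ≤ k) :
    ∀ (l : List Int) (tot run : Int), 0 ≤ run →
      l.foldl (pvStepA cooldown mid k) (tot + PySem.Int.floordiv run k, PySem.Int.mod run k)
        = ((l.foldl (pvStepRun cooldown mid k) (tot, run)).1
            + PySem.Int.floordiv (l.foldl (pvStepRun cooldown mid k) (tot, run)).2 k,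
           PySem.Int.mod (l.foldl (pvStepRun cooldown mid k) (tot, run)).2 k)
      ∧ 0 ≤ (l.foldl (pvStepRun cooldown mid k) (tot, run)).2 := by
  intro l
  induction l with
  | nil => intro tot run hr; exact ⟨rfl, hr⟩
  | cons i t ih =>
    intro tot run hr
    have hkpos : (0:Int) < k := by omega
    have hfd : ∀ x : Int, PySem.Int.floordiv x k = x / k :=
      fun x => PySem.Int.floordiv_eq_ediv_of_pos hkpos
    have hmd : ∀ x : Int, PySem.Int.mod x k = x % k :=
      fun x => PySem.Int.mod_eq_emod_of_pos hkpos
    simp only [List.foldl_cons]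
    by_cases hc : PySem.List.pyGetD cooldown i 0 ≤ mid
    · -- element extends the run
      have hB : pvStepRun cooldown mid k (tot, run) i = (tot, run + 1) := by
        simp [pvStepRun, hc]
      by_cases hroll : PySem.Int.mod run k + 1 = k
      · have hroll' : run % k + 1 = k := by rw [hmd] at hroll; exact hroll
        have hrw := pv_div_succ_roll k run hk hr hroll'
        have hA : pvStepA cooldown mid k
            (tot + PySem.Int.floordiv run k, PySem.Int.mod run k) i
            = (tot + PySem.Int.floordiv (run + 1) k, PySem.Int.mod (run + 1) k) := by
          simp only [pvStepA, hc, if_pos, hfd, hmd, hroll']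
          rw [hrw.1, hrw.2, add_assoc]
        rw [hA, hB]
        exact ih tot (run + 1) (by omega)
      · have hroll' : run % k + 1 ≠ k := by rw [hmd] at hroll; exact hroll
        have hrw := pv_div_succ_keep k run hk hr hroll'
        have hA : pvStepA cooldown mid k
            (tot + PySem.Int.floordiv run k, PySem.Int.mod run k) i
            = (tot + PySem.Int.floordiv (run + 1) k, PySem.Int.mod (run + 1) k) := by
          simp only [pvStepA, hc, if_pos, hfd, hmd]
          rw [if_neg hroll', hrw.1, hrw.2]
        rw [hA, hB]
        exact ih tot (run + 1) (by omega)
    · -- element ends the run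
      have hB : pvStepRun cooldown mid k (tot, run) i
          = (tot + PySem.Int.floordiv run k, 0) := by
        simp [pvStepRun, hc]
      have hA : pvStepA cooldown mid k
          (tot + PySem.Int.floordiv run k, PySem.Int.mod run k) i
          = ((tot + PySem.Int.floordiv run k) + PySem.Int.floordiv 0 k,
             PySem.Int.mod 0 k) := by
        have hk0 : (0:Int) ≠ k := by omega
        simp only [pvStepA, hc, if_false, if_neg hk0, hfd, hmd]
        norm_num
      rw [hA, hB]
      exact ih (tot + PySem.Int.floordiv run k) 0 (by omega)

-- invariant II: on the range [0, j), the run fold's state is (Bf.1, j - Bf.2 - 1) where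
-- Bf is B's blocker fold, whose 'prev' component satisfies -1 ≤ prev < j.
lemma pv_seg (cooldown : List Int) (mid k : Int) :
    ∀ (j : Nat),
      (PySem.List.pyRange 0 (j : Int) 1).foldl (pvStepRun cooldown mid k) ((0:Int), (0:Int))
        = ((((PySem.List.pyRange 0 (j : Int) 1).filter
              (fun i => decide (mid < PySem.List.pyGetD cooldown i 0))).foldl (pvFlushB k) ((0:Int), (-1:Int))).1,
           (j : Int)
             - (((PySem.List.pyRange 0 (j : Int) 1).filter
              (fun i => decide (mid < PySem.List.pyGetD cooldown i 0))).foldl (pvFlushB k) ((0:Int), (-1:Int))).2 - 1)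
      ∧ (-1 : Int) ≤ (((PySem.List.pyRange 0 (j : Int) 1).filter
              (fun i => decide (mid < PySem.List.pyGetD cooldown i 0))).foldl (pvFlushB k) ((0:Int), (-1:Int))).2
      ∧ (((PySem.List.pyRange 0 (j : Int) 1).filter
              (fun i => decide (mid < PySem.List.pyGetD cooldown i 0))).foldl (pvFlushB k) ((0:Int), (-1:Int))).2 < (j : Int) := by
  intro j
  induction j with
  | zero =>
    rw [PySem.List.pyRange_one_eq_nil (by norm_num)]
    norm_num
  | succ j ih =>
    have hsplit : PySem.List.pyRange 0 ((j + 1 : Nat) : Int) 1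
        = PySem.List.pyRange 0 (j : Int) 1 ++ [(j : Int)] := by
      push_cast
      exact PySem.List.pyRange_one_succ_right (by positivity)
    rw [hsplit, List.filter_append, List.foldl_append, List.foldl_append]
    obtain ⟨h1, h2, h3⟩ := ih
    by_cases hc : mid < PySem.List.pyGetD cooldown (j : Int) 0
    · -- j is a blocker: run flushes, prev becomes j
      simp only [List.filter_cons, List.filter_nil, decide_eq_true_eq, if_pos hc]
      rw [h1]
      refine ⟨?_, ?_, ?_⟩
      · simp only [List.foldl_cons, List.foldl_nil, pvStepRun, pvFlushB]
        rw [if_neg (by omega)]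
        push_cast; ring_nf
      · simp only [List.foldl_cons, List.foldl_nil, pvFlushB]; omega
      · simp only [List.foldl_cons, List.foldl_nil, pvFlushB]; push_cast; omega
    · -- j is not a blocker: run extends, prev unchanged
      simp only [List.filter_cons, List.filter_nil, decide_eq_true_eq, if_neg hc]
      rw [h1]
      refine ⟨?_, ?_, ?_⟩
      · simp only [List.foldl_cons, List.foldl_nil, pvStepRun]
        rw [if_pos (by omega)]
        push_cast; ring_nf
      · simp only [List.foldl_nil]; exact h2
      · simp only [List.foldl_nil]; push_cast; omega

-- ===== VERDICT (by name: the statement is the Claim_ definition above) =====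
theorem upgrade_possible_spec : Claim_equal_upgrade_possible := by
  intro cooldown mid n m k _ hpre
  obtain ⟨-, hk⟩ := hpre
  unfold Spec_upgrade_possible upgrade_possible upgrade_possible_alt
  dsimp only
  by_cases hn : 0 ≤ n
  · have hcast : n = ((n.toNat : Nat) : Int) := (Int.toNat_of_nonneg hn).symm
    have hseg := pv_seg cooldown mid k n.toNat
    rw [← hcast] at hseg
    have hinv := pv_inv cooldown mid k hk (PySem.List.pyRange 0 n 1) 0 0 le_rfl
    have hz : ((0:Int) + PySem.Int.floordiv 0 k, PySem.Int.mod 0 k) = ((0:Int), (0:Int)) := by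
      rw [PySem.Int.floordiv_eq_ediv_of_pos (by omega), PySem.Int.mod_eq_emod_of_pos (by omega)]
      norm_num
    rw [hz] at hinv
    have hlen : (((PySem.List.pyRange 0 n 1).length : Nat) : Int) = n := by
      rw [PySem.List.length_pyRange_one]; omega
    rw [hinv.1, hseg.1, hlen]
  · -- n < 0: the scanned range is empty on both sides
    rw [PySem.List.pyRange_one_eq_nil (by omega)]
    simp [PySem.Int.floordiv_eq_ediv_of_pos (show (0:Int) < k by omega)]
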